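-- pv_equiv track=rewrite | github.com/jerzeuek/UWr_projects | Artificial Intelligence (Python)/W1/zad1.py | rook_positions
-- ===== SOURCE A (Python) =====
-- def rook_positions(rook_pos, w_king_pos, b_king_pos):
--     letters = 'abcdefgh'
--     pos_list = []
--
--     letter = letters.index(rook_pos[0])
--     number = int(rook_pos[1])
--
--     for i in range(letter - 1, -1, -1):
--         if(i in range(0,8)):
--             possible_position = letters[i] + str(number)
--             if(possible_position == w_king_pos):
--                 break
--             pos_list.append(possible_position)
--             if(possible_position == b_king_pos):
--                 break
--
--     for i in range(letter + 1, 8):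
--         if(i in range(0,8)):
--             possible_position = letters[i] + str(number)
--             if(possible_position == w_king_pos):
--                 break
--             pos_list.append(possible_position)
--             if(possible_position == b_king_pos):
--                 break
--
--     for i in range(number - 1, 0, -1):
--         if(i in range(1,9)):
--             possible_position = letters[letter] + str(i)
--             if(possible_position == w_king_pos):
--                 break
--             pos_list.append(possible_position)
--             if(possible_position == b_king_pos):
--                 break
--
--     for i in range(number + 1, 9):
--         if(i in range(1,9)):
--             possible_position = letters[letter] + str(i)
--             if(possible_position == w_king_pos):
--                 break
--             pos_list.append(possible_position)
--             if(possible_position == b_king_pos):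
--                 break
--
--     return pos_list
-- ===== SOURCE B (Python) =====
-- def _visible(ray, w, b):
--     # cut the ray at the kings: stop before the white king, after the black one
--     if w in ray:
--         ray = ray[:ray.index(w)]
--     if b in ray:
--         ray = ray[:ray.index(b) + 1]
--     return ray
--
--
-- def rook_positions(rook_pos, w_king_pos, b_king_pos):
--     letters = 'abcdefgh'
--     col = letters.index(rook_pos[0])
--     row = int(rook_pos[1])
--     rays = [
--         [letters[c] + str(row) for c in range(col - 1, -1, -1)],
--         [letters[c] + str(row) for c in range(col + 1, 8)],
--         [letters[col] + str(r) for r in range(row - 1, 0, -1)],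
--         [letters[col] + str(r) for r in range(row + 1, 9)],
--     ]
--     return [sq for ray in rays for sq in _visible(ray, w_king_pos, b_king_pos)]
-- ===== Notes on version B (the rewrite author's own statement) =====
-- stated objective: simpler
-- what changed: B replaces A's four copy-pasted guarded break-loops by building each of the four full rays with comprehensions and then cutting each ray at the kings with index/slice (stop before the white king, after the black king), concatenating the cut rays.
import Mathlib
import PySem

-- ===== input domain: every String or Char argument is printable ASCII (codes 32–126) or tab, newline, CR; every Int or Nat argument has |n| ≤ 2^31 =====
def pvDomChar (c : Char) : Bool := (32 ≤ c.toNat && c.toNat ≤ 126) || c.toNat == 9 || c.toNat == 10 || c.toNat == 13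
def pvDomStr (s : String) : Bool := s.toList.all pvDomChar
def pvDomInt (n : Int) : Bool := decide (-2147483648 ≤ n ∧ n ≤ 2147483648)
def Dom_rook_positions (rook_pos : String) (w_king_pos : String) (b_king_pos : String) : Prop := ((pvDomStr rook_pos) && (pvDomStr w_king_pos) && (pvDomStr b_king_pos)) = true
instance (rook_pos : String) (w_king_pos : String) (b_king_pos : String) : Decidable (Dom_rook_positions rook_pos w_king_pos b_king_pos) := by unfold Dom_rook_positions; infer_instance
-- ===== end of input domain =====

-- B replaces A's four copy-pasted break-loops by building each full ray and cutting it at the kings by index/slice (objective: simpler; same cost).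

-- ===== PORT A =====
def pvLetters : List Char := "abcdefgh".toList

-- letters[i] + str(number); the loop guard `i in range(0,8)` guarantees i is in range, so pyGetD is exact
def pvSqCol (number : Int) (i : Int) : String :=
  String.ofList (PySem.List.pyGetD pvLetters i ' ' :: PySem.Int.toChars number)

-- letters[letter] + str(i); letter comes from letters.index, so it is in range and pyGetD is exact
def pvSqRow (letter : Int) (i : Int) : String :=
  String.ofList (PySem.List.pyGetD pvLetters letter ' ' :: PySem.Int.toChars i)

-- one of A's four identical for-loops (they differ only in the iterated range, the guard range and the square expression):
-- guard `i in range(glo, ghi)`; `break` before appending on the white king, after appending on the black king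
def pvALoop (glo ghi : Int) (mk : Int → String) (w b : String) :
    List Int → List String → List String
  | [], acc => acc
  | i :: rest, acc =>
    if i ∈ PySem.List.pyRange glo ghi 1 then
      if mk i = w then acc
      else if mk i = b then acc ++ [mk i]
      else pvALoop glo ghi mk w b rest (acc ++ [mk i])
    else pvALoop glo ghi mk w b rest acc

def rook_positions (rook_pos : String) (w_king_pos : String) (b_king_pos : String) : List String :=
  match PySem.Str.pyGet? rook_pos 0 with
  | none => []  -- IndexError: excluded by Pre_
  | some c0 =>
    -- letters.index(rook_pos[0]) for a 1-char needle = first index of that char; ValueError (none) excluded by Pre_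
    match PySem.List.index? pvLetters c0 with
    | none => []
    | some letterN =>
      let letter : Int := letterN
      match PySem.Str.pyGet? rook_pos 1 with
      | none => []  -- IndexError: excluded by Pre_
      | some c1 =>
        match PySem.Int.ofStr? (String.ofList [c1]) with
        | none => []  -- ValueError: excluded by Pre_
        | some number =>
          let l1 := pvALoop 0 8 (pvSqCol number) w_king_pos b_king_pos
                      (PySem.List.pyRange (letter - 1) (-1) (-1)) []
          let l2 := pvALoop 0 8 (pvSqCol number) w_king_pos b_king_pos
                      (PySem.List.pyRange (letter + 1) 8 1) l1
          let l3 := pvALoop 1 9 (pvSqRow letter) w_king_pos b_king_pos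
                      (PySem.List.pyRange (number - 1) 0 (-1)) l2
          pvALoop 1 9 (pvSqRow letter) w_king_pos b_king_pos
                      (PySem.List.pyRange (number + 1) 9 1) l3

-- ===== PORT B =====
-- _visible: ray[:ray.index(w)] / ray[:ray.index(b)+1]; the membership tests guard index, so getD is exact
def pvVisible (ray : List String) (w b : String) : List String :=
  let ray1 := if w ∈ ray then
      PySem.List.slice ray none (some (((PySem.List.index? ray w).getD 0 : Nat) : Int))
    else ray
  if b ∈ ray1 then
    PySem.List.slice ray1 none (some ((((PySem.List.index? ray1 b).getD 0 : Nat) : Int) + 1))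
  else ray1

def rook_positions_alt (rook_pos : String) (w_king_pos : String) (b_king_pos : String) : List String :=
  match PySem.Str.pyGet? rook_pos 0 with
  | none => []
  | some c0 =>
    match PySem.List.index? pvLetters c0 with
    | none => []
    | some colN =>
      let col : Int := colN
      match PySem.Str.pyGet? rook_pos 1 with
      | none => []
      | some c1 =>
        match PySem.Int.ofStr? (String.ofList [c1]) with
        | none => []
        | some row =>
          let rays : List (List String) :=
            [ (PySem.List.pyRange (col - 1) (-1) (-1)).map (pvSqCol row),
              (PySem.List.pyRange (col + 1) 8 1).map (pvSqCol row),
              (PySem.List.pyRange (row - 1) 0 (-1)).map (pvSqRow col),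
              (PySem.List.pyRange (row + 1) 9 1).map (pvSqRow col) ]
          rays.flatMap (fun ray => pvVisible ray w_king_pos b_king_pos)

-- ===== PRECONDITION & SPEC =====
-- Pre_ = exactly the inputs on which A returns: rook_pos has ≥ 2 characters, its first is one of
-- 'a'..'h' (else letters.index raises ValueError) and its second is a decimal digit (else int raises ValueError).
def Pre_rook_positions (rook_pos : String) (w_king_pos : String) (b_king_pos : String) : Prop :=
  2 ≤ rook_pos.toList.length ∧ rook_pos.toList.getD 0 ' ' ∈ pvLetters ∧
    (rook_pos.toList.getD 1 ' ').isDigit = true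
instance (rook_pos : String) (w_king_pos : String) (b_king_pos : String) : Decidable (Pre_rook_positions rook_pos w_king_pos b_king_pos) := by unfold Pre_rook_positions; infer_instance

def pvWitness_rook_positions : String × String × String := ("d4", "d6", "g4")

def Spec_rook_positions (rook_pos : String) (w_king_pos : String) (b_king_pos : String) (out : List String) : Prop := out = rook_positions_alt rook_pos w_king_pos b_king_pos
instance (rook_pos : String) (w_king_pos : String) (b_king_pos : String) (out : List String) : Decidable (Spec_rook_positions rook_pos w_king_pos b_king_pos out) := by unfold Spec_rook_positions; infer_instance

-- ===== CLAIM (what is proved, stated in full; the proofs are below) =====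
def Claim_equal_rook_positions : Prop := ∀ (rook_pos : String) (w_king_pos : String) (b_king_pos : String), Dom_rook_positions rook_pos w_king_pos b_king_pos → Pre_rook_positions rook_pos w_king_pos b_king_pos → Spec_rook_positions rook_pos w_king_pos b_king_pos (rook_positions rook_pos w_king_pos b_king_pos)

-- ===== LEMMAS AND PROOFS =====

theorem pvVisible_nil (w b : String) : pvVisible [] w b = [] := by
  simp [pvVisible]

theorem pvCutW_cons (v p : String) (xs : List String) (h : p ≠ v) :
    (if v ∈ (p :: xs) then
        PySem.List.slice (p :: xs) none (some (((PySem.List.index? (p :: xs) v).getD 0 : Nat) : Int))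
      else p :: xs)
    = p :: (if v ∈ xs then
        PySem.List.slice xs none (some (((PySem.List.index? xs v).getD 0 : Nat) : Int))
      else xs) := by
  by_cases hv : v ∈ xs
  · rcases Option.isSome_iff_exists.mp ((PySem.List.index?_isSome_iff xs v).mpr hv) with ⟨k, hk⟩
    rw [if_pos (List.mem_cons_of_mem p hv), if_pos hv, PySem.List.index?_cons_of_ne xs h, hk]
    simp only [Option.map_some, Option.getD_some]
    rw [PySem.List.slice_to_natCast, PySem.List.slice_to_natCast, List.take_succ_cons]
  · rw [if_neg (by simp [Ne.symm h, hv]), if_neg hv]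

theorem pvCutB_cons (v p : String) (xs : List String) (h : p ≠ v) :
    (if v ∈ (p :: xs) then
        PySem.List.slice (p :: xs) none (some ((((PySem.List.index? (p :: xs) v).getD 0 : Nat) : Int) + 1))
      else p :: xs)
    = p :: (if v ∈ xs then
        PySem.List.slice xs none (some ((((PySem.List.index? xs v).getD 0 : Nat) : Int) + 1))
      else xs) := by
  by_cases hv : v ∈ xs
  · rcases Option.isSome_iff_exists.mp ((PySem.List.index?_isSome_iff xs v).mpr hv) with ⟨k, hk⟩
    rw [if_pos (List.mem_cons_of_mem p hv), if_pos hv, PySem.List.index?_cons_of_ne xs h, hk]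
    simp only [Option.map_some, Option.getD_some]
    rw [show ((k + 1 : Nat) : Int) + 1 = ((k + 2 : Nat) : Int) by push_cast; ring,
        show ((k : Nat) : Int) + 1 = ((k + 1 : Nat) : Int) by push_cast; ring,
        PySem.List.slice_to_natCast, PySem.List.slice_to_natCast, List.take_succ_cons]
  · rw [if_neg (by simp [Ne.symm h, hv]), if_neg hv]

theorem pvVisible_cons_w (w b : String) (sqs : List String) :
    pvVisible (w :: sqs) w b = [] := by
  simp only [pvVisible]
  rw [if_pos (List.mem_cons_self), PySem.List.index?_cons_self]
  simp only [Option.getD_some]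
  rw [PySem.List.slice_to_natCast, List.take_zero]
  simp

theorem pvVisible_cons_b (w b : String) (sqs : List String) (hbw : b ≠ w) :
    pvVisible (b :: sqs) w b = [b] := by
  simp only [pvVisible]
  have step2 : ∀ X : List String,
      (if b ∈ b :: X then
        PySem.List.slice (b :: X) none (some ((((PySem.List.index? (b :: X) b).getD 0 : Nat) : Int) + 1))
      else b :: X) = [b] := by
    intro X
    rw [if_pos (List.mem_cons_self), PySem.List.index?_cons_self]
    simp only [Option.getD_some]
    rw [show ((0 : Nat) : Int) + 1 = ((1 : Nat) : Int) by norm_num,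
        PySem.List.slice_to_natCast, List.take_succ_cons, List.take_zero]
  by_cases hw : w ∈ sqs
  · rcases Option.isSome_iff_exists.mp ((PySem.List.index?_isSome_iff sqs w).mpr hw) with ⟨k, hk⟩
    rw [if_pos (List.mem_cons_of_mem b hw), PySem.List.index?_cons_of_ne sqs hbw, hk]
    simp only [Option.map_some, Option.getD_some]
    rw [PySem.List.slice_to_natCast, List.take_succ_cons]
    exact step2 _
  · have hnot : w ∉ b :: sqs := by
      intro hc
      rcases List.mem_cons.mp hc with h' | h'
      · exact hbw h'.symm
      · exact hw h'
    rw [if_neg hnot]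
    exact step2 _

theorem pvVisible_cons_ne (w b p : String) (sqs : List String)
    (h1 : p ≠ w) (h2 : p ≠ b) :
    pvVisible (p :: sqs) w b = p :: pvVisible sqs w b := by
  simp only [pvVisible]
  rw [pvCutW_cons w p sqs h1, pvCutB_cons b p _ h2]

theorem pvALoop_eq (glo ghi : Int) (mk : Int → String) (w b : String) :
    ∀ (l : List Int) (acc : List String), (∀ i ∈ l, i ∈ PySem.List.pyRange glo ghi 1) →
      pvALoop glo ghi mk w b l acc = acc ++ pvVisible (l.map mk) w b
  | [], acc, _ => by simp [pvALoop, pvVisible_nil]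
  | i :: rest, acc, hg => by
    have hi : i ∈ PySem.List.pyRange glo ghi 1 := hg i (by simp)
    simp only [pvALoop, List.map_cons]
    rw [if_pos hi]
    by_cases h1 : mk i = w
    · rw [if_pos h1, h1, pvVisible_cons_w w b (rest.map mk), List.append_nil]
    · rw [if_neg h1]
      by_cases h2 : mk i = b
      · rw [if_pos h2, h2, pvVisible_cons_b w b (rest.map mk) (fun h => h1 (h2.trans h))]
      · rw [if_neg h2,
            pvALoop_eq glo ghi mk w b rest (acc ++ [mk i])
              (fun j hj => hg j (List.mem_cons_of_mem _ hj)),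
            pvVisible_cons_ne w b (mk i) (rest.map mk) h1 h2]
        simp

theorem pvDigit_ofStr (c : Char) (h : c.isDigit = true) :
    PySem.Int.ofStr? (String.ofList [c]) = some ((c.toNat : Int) - 48) := by
  simp only [Char.isDigit, decide_eq_true_eq, Bool.and_eq_true] at h
  have h1 : 48 ≤ c.toNat := h.1
  have h2 : c.toNat ≤ 57 := h.2
  have hc := (Char.ofNat_toNat c).symm
  interval_cases hv : c.toNat <;> rw [hc] <;> decide

theorem pvIndex_lt (c : Char) (k : Nat) (h : PySem.List.index? pvLetters c = some k) : k < 8 := by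
  rcases PySem.List.getElem_of_index?_eq_some h with ⟨hk, _⟩
  simpa [pvLetters] using hk

-- ===== VERDICT (by name: the statement is the Claim_ definition above) =====
theorem rook_positions_spec : Claim_equal_rook_positions := by
  intro r w b _ hpre
  obtain ⟨hlen, hc0, hc1⟩ := hpre
  unfold Spec_rook_positions
  -- expose rook_pos[0], letters.index, rook_pos[1], int(rook_pos[1]) as `some`s
  cases hL : r.toList with
  | nil => simp [hL] at hlen
  | cons a t =>
    cases hT : t with
    | nil => simp [hL, hT] at hlen
    | cons a1 t1 =>
      subst hT
      have hg0 : PySem.Str.pyGet? r 0 = some a := by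
        simp [PySem.Str.pyGet?, hL, PySem.List.pyGet?_zero_cons]
      have hg1 : PySem.Str.pyGet? r 1 = some a1 := by
        simp [PySem.Str.pyGet?, hL, PySem.List.pyGet?, PySem.List.pyIdx?]
      rw [hL] at hc0 hc1
      simp only [List.getD_cons_zero, List.getD_cons_succ] at hc0 hc1
      rcases Option.isSome_iff_exists.mp ((PySem.List.index?_isSome_iff pvLetters a).mpr hc0)
        with ⟨k, hk⟩
      have hk8 : k < 8 := pvIndex_lt a k hk
      have hn := pvDigit_ofStr a1 hc1
      have hd := hc1
      simp only [Char.isDigit, decide_eq_true_eq, Bool.and_eq_true] at hd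
      have h48 : 48 ≤ a1.toNat := hd.1
      have h57 : a1.toNat ≤ 57 := hd.2
      simp only [rook_positions, rook_positions_alt, hg0, hk, hg1, hn]
      rw [pvALoop_eq 0 8 (pvSqCol ((a1.toNat : Int) - 48)) w b _ []
            (by intro i hi
                rw [PySem.List.mem_pyRange_neg_one] at hi
                rw [PySem.List.mem_pyRange_one]; omega),
          pvALoop_eq 0 8 (pvSqCol ((a1.toNat : Int) - 48)) w b _ _
            (by intro i hi
                rw [PySem.List.mem_pyRange_one] at hi ⊢; omega),
          pvALoop_eq 1 9 (pvSqRow k) w b _ _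
            (by intro i hi
                rw [PySem.List.mem_pyRange_one] at hi ⊢; omega),
          pvALoop_eq 1 9 (pvSqRow k) w b _ _
            (by intro i hi
                rw [PySem.List.mem_pyRange_neg_one] at hi
                rw [PySem.List.mem_pyRange_one]; omega)]
      simp [List.flatMap, List.append_assoc]
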